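-- pv_equiv track=rewrite | github.com/svend4/data20 | mobile-app-versions/v5-full/android/app/src/full/python/backend_main_simple.py | text_encoder_impl
-- ===== SOURCE A (Python) =====
-- def text_encoder_impl(params):
--     """Encode text (ROT13, Atbash)"""
--     text = params.get('text', '')
--     method = params.get('method', 'rot13')
--
--     if method == 'rot13':
--         import codecs
--         result = codecs.encode(text, 'rot_13')
--     elif method == 'atbash':
--         result = ''
--         for c in text:
--             if c.isalpha():
--                 if c.isupper():
--                     result += chr(90 - (ord(c) - 65))
--                 else:
--                     result += chr(122 - (ord(c) - 97))
--             else: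
--                 result += c
--     else:
--         result = text
--
--     return {
--         'original': text,
--         'encoded': result,
--         'method': method
--     }
-- ===== SOURCE B (Python) =====
-- import string
--
-- def text_encoder_impl(params):
--     """Encode text (ROT13, Atbash) via a precomputed translation table."""
--     text = params.get('text', '')
--     method = params.get('method', 'rot13')
--     up, lo = string.ascii_uppercase, string.ascii_lowercase
--     if method == 'rot13':
--         table = str.maketrans(up + lo, up[13:] + up[:13] + lo[13:] + lo[:13])
--         result = text.translate(table)
--     elif method == 'atbash':
--         table = str.maketrans(up + lo, up[::-1] + lo[::-1])
--         result = text.translate(table)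
--     else:
--         result = text
--     return {'original': text, 'encoded': result, 'method': method}
-- ===== Notes on version B (the rewrite author's own statement) =====
-- stated objective: idiomatic
-- what changed: Replaces A's per-character isalpha/isupper arithmetic branching (and the codecs rot13 call) by a precomputed str.maketrans translation table applied with text.translate in a single pass for both ciphers.
import Mathlib
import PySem

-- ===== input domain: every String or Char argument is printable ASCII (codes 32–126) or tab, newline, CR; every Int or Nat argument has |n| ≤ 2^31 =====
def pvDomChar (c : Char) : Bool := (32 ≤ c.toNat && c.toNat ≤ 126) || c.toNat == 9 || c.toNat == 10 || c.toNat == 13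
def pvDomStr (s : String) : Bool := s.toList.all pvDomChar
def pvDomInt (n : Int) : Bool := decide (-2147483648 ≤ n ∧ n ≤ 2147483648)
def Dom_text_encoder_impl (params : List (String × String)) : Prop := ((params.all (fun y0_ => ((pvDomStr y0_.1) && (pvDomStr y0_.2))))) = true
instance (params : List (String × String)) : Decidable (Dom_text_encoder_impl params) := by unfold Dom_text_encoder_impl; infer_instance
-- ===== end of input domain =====

-- B replaces A's per-character isalpha/isupper arithmetic branches by a precomputed
-- 52-entry translation table (str.maketrans/translate style); objective: idiomatic.

-- ===== PORT A =====
-- codecs.encode(text, 'rot_13'): per-character ROT13, exact on every character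
-- (letters rotate by 13 inside their case, everything else unchanged).
def pvRot13Char (c : Char) : Char :=
  if PySem.Chars.isalpha c then
    if PySem.Chars.isupper c then Char.ofNat (65 + (c.toNat - 65 + 13) % 26)
    else Char.ofNat (97 + (c.toNat - 97 + 13) % 26)
  else c

def text_encoder_impl (params : List (String × String)) : List (String × String) :=
  let text := (List.lookup "text" params).getD ""
  let method := (List.lookup "method" params).getD "rot13"
  let result :=
    if method = "rot13" then String.ofList (text.toList.map pvRot13Char)
    else if method = "atbash" then
      -- A's explicit loop: result += branch-chosen character
      String.ofList (text.toList.foldl (fun acc c =>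
        acc ++ [if PySem.Chars.isalpha c then
                  (if PySem.Chars.isupper c then Char.ofNat (90 - (c.toNat - 65))
                   else Char.ofNat (122 - (c.toNat - 97)))
                else c]) [])
    else text
  [("original", text), ("encoded", result), ("method", method)]

-- ===== PORT B =====
def pvUp : List Char := "ABCDEFGHIJKLMNOPQRSTUVWXYZ".toList
def pvLo : List Char := "abcdefghijklmnopqrstuvwxyz".toList

-- str.maketrans(up+lo, up[13:]+up[:13]+lo[13:]+lo[:13])
def pvRotTable : List (Char × Char) :=
  (pvUp ++ pvLo).zip ((pvUp.drop 13 ++ pvUp.take 13) ++ (pvLo.drop 13 ++ pvLo.take 13))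

-- str.maketrans(up+lo, up[::-1]+lo[::-1])
def pvAtbashTable : List (Char × Char) :=
  (pvUp ++ pvLo).zip (pvUp.reverse ++ pvLo.reverse)

-- text.translate(table): one pass, table lookup with the character itself as default
def pvTranslate (tbl : List (Char × Char)) (text : String) : String :=
  String.ofList (text.toList.map (fun c => (List.lookup c tbl).getD c))

def text_encoder_impl_alt (params : List (String × String)) : List (String × String) :=
  let text := (List.lookup "text" params).getD ""
  let method := (List.lookup "method" params).getD "rot13"
  let result :=
    if method = "rot13" then pvTranslate pvRotTable text
    else if method = "atbash" then pvTranslate pvAtbashTable text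
    else text
  [("original", text), ("encoded", result), ("method", method)]

-- ===== PRECONDITION & SPEC =====
def Spec_text_encoder_impl (params : List (String × String)) (out : List (String × String)) : Prop := out = text_encoder_impl_alt params
instance (params : List (String × String)) (out : List (String × String)) : Decidable (Spec_text_encoder_impl params out) := by unfold Spec_text_encoder_impl; infer_instance

-- ===== CLAIM (what is proved, stated in full; the proofs are below) =====
def Claim_equal_text_encoder_impl : Prop := ∀ (params : List (String × String)), Dom_text_encoder_impl params → Spec_text_encoder_impl params (text_encoder_impl params)

-- ===== LEMMAS AND PROOFS =====

-- A's rot13 per-character transform agrees with B's table lookup on every ASCII char.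
set_option maxRecDepth 4096 in
theorem rot13_char_eq_table : ∀ n ∈ List.range 127,
    pvRot13Char (Char.ofNat n) =
      ((List.lookup (Char.ofNat n) pvRotTable).getD (Char.ofNat n)) := by
  decide

-- A's atbash per-character branch agrees with B's table lookup on every ASCII char.
set_option maxRecDepth 4096 in
theorem atbash_char_eq_table : ∀ n ∈ List.range 127,
    (if PySem.Chars.isalpha (Char.ofNat n) then
        (if PySem.Chars.isupper (Char.ofNat n) then Char.ofNat (90 - ((Char.ofNat n).toNat - 65))
         else Char.ofNat (122 - ((Char.ofNat n).toNat - 97)))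
      else Char.ofNat n) =
      ((List.lookup (Char.ofNat n) pvAtbashTable).getD (Char.ofNat n)) := by
  decide

theorem domChar_lt (c : Char) (h : pvDomChar c = true) : c.toNat ∈ List.range 127 := by
  simp [pvDomChar] at h
  simp [List.mem_range]
  omega

-- every character of a string obtained from params (or the default "") satisfies pvDomChar
theorem lookup_dom (params : List (String × String)) (k : String)
    (hdom : Dom_text_encoder_impl params) :
    ∀ c ∈ ((List.lookup k params).getD "").toList, pvDomChar c = true := by
  induction params with
  | nil => intro c hc; simp [List.lookup] at hc
  | cons p ps ih =>
    have hdom' : Dom_text_encoder_impl ps := by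
      unfold Dom_text_encoder_impl at hdom ⊢
      simp [List.all_cons] at hdom ⊢
      exact hdom.2
    unfold Dom_text_encoder_impl at hdom
    simp [List.all_cons, pvDomStr, List.all_eq_true] at hdom
    intro c hc
    rw [List.lookup] at hc
    by_cases hk : k == p.1
    · simp [hk] at hc
      exact hdom.1.2 c hc
    · simp [hk] at hc
      exact ih hdom' c hc

-- per-string agreement of the two encoders, for dom-clean text
theorem rot13_eq (text : String) (h : ∀ c ∈ text.toList, pvDomChar c = true) :
    String.ofList (text.toList.map pvRot13Char) = pvTranslate pvRotTable text := by
  unfold pvTranslate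
  congr 1
  apply List.map_congr_left
  intro c hc
  have := rot13_char_eq_table c.toNat (domChar_lt c (h c hc))
  rwa [Char.ofNat_toNat] at this

theorem atbash_eq (text : String) (h : ∀ c ∈ text.toList, pvDomChar c = true) :
    String.ofList (text.toList.foldl (fun acc c =>
        acc ++ [if PySem.Chars.isalpha c then
                  (if PySem.Chars.isupper c then Char.ofNat (90 - (c.toNat - 65))
                   else Char.ofNat (122 - (c.toNat - 97)))
                else c]) []) = pvTranslate pvAtbashTable text := by
  unfold pvTranslate
  rw [PySem.List.foldl_append_singleton_eq_map]
  congr 1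
  apply List.map_congr_left
  intro c hc
  have := atbash_char_eq_table c.toNat (domChar_lt c (h c hc))
  rwa [Char.ofNat_toNat] at this

-- ===== VERDICT =====
theorem text_encoder_impl_spec : Claim_equal_text_encoder_impl := by
  intro params hdom
  unfold Spec_text_encoder_impl text_encoder_impl text_encoder_impl_alt
  have htext := lookup_dom params "text" hdom
  simp only [List.cons.injEq, Prod.mk.injEq, and_true, true_and]
  by_cases h1 : ((List.lookup "method" params).getD "rot13") = "rot13"
  · simp only [h1, if_true]
    exact rot13_eq _ htext
  · by_cases h2 : ((List.lookup "method" params).getD "rot13") = "atbash"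
    · simp only [h2, if_true]
      exact atbash_eq _ htext
    · simp only [if_neg h1, if_neg h2]
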